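-- pv_equiv track=rewrite | github.com/Vaillus/revolut-expense-manager | src/utilities/data_loader.py | update_tags_config
-- ===== SOURCE A (Python) =====
-- from typing import List, Dict, Any, Optional
--
-- def update_tags_config(tags_config: dict, new_tags: List[str]) -> dict:
--     """Update tags configuration with new tags and their usage counts"""
--     updated_tags = tags_config.copy()
--
--     for tag in new_tags:
--         if tag in updated_tags:
--             updated_tags[tag] += 1
--         else:
--             updated_tags[tag] = 1
--
--     return updated_tags
-- ===== SOURCE B (Python) =====
-- def update_tags_config(tags_config: dict, new_tags):
--     """Rebuild the result directly: re-emit each existing tag with its count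
--     bumped by the tag's occurrences in new_tags, then append the genuinely
--     new tags (first-appearance order) with their occurrence counts."""
--     updated_tags = {tag: count + new_tags.count(tag)
--                     for tag, count in tags_config.items()}
--     for tag in new_tags:
--         if tag not in updated_tags:
--             updated_tags[tag] = new_tags.count(tag)
--     return updated_tags
-- ===== Notes on version B (the rewrite author's own statement) =====
-- stated objective: alternative
-- what changed: A mutates a copied dict by incrementing once per occurrence while scanning new_tags; B never increments: it rebuilds the result directly, re-emitting each existing entry with its count plus new_tags.count(tag), then appending each genuinely new tag at its first appearance with its full occurrence count, trading the single incremental pass for per-key counting (O(n*m) instead of O(n+m)).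
import Mathlib
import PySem

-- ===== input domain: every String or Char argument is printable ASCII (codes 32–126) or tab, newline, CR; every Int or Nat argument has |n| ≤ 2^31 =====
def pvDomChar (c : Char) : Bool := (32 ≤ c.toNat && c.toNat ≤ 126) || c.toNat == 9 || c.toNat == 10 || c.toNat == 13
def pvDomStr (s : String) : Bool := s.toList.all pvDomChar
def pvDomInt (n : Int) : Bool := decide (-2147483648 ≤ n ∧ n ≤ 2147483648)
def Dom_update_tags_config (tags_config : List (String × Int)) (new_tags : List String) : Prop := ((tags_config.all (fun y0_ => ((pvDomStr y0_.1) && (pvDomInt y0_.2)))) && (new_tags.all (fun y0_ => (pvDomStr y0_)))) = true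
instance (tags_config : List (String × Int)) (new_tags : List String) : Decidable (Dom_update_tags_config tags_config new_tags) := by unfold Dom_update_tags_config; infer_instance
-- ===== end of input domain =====

-- B rebuilds the result directly (existing entries re-emitted with count+occurrences, then new tags appended with their full counts) instead of A's per-occurrence dict increments; alternative decomposition, same values.


-- ===== PORT A =====
-- A: copy the dict, then one pass over new_tags incrementing (or initialising) each tag's count.
def update_tags_config (tags_config : List (String × Int)) (new_tags : List String) : List (String × Int) :=
  (new_tags.foldl
      (fun updated_tags tag =>
        if updated_tags.contains tag then updated_tags.modify tag 0 (· + 1)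
        else updated_tags.insert tag 1)
      (PySem.Dict.ofList tags_config)).items

-- ===== PORT B =====
-- B: dict comprehension re-emitting each existing entry with count + new_tags.count(tag),
-- then a pass over new_tags appending each not-yet-present tag with its full count.
def update_tags_config_alt (tags_config : List (String × Int)) (new_tags : List String) : List (String × Int) :=
  let base := (PySem.Dict.ofList tags_config).items.map
      (fun p => (p.1, p.2 + (new_tags.count p.1 : Int)))
  (new_tags.foldl
      (fun updated_tags tag =>
        if updated_tags.contains tag then updated_tags
        else updated_tags.insert tag (new_tags.count tag : Int))
      (PySem.Dict.ofList base)).items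

-- ===== PRECONDITION & SPEC =====
def Spec_update_tags_config (tags_config : List (String × Int)) (new_tags : List String) (out : List (String × Int)) : Prop := out = update_tags_config_alt tags_config new_tags
instance (tags_config : List (String × Int)) (new_tags : List String) (out : List (String × Int)) : Decidable (Spec_update_tags_config tags_config new_tags out) := by unfold Spec_update_tags_config; infer_instance

-- ===== CLAIM (what is proved, stated in full; the proofs are below) =====
def Claim_equal_update_tags_config : Prop := ∀ (tags_config : List (String × Int)) (new_tags : List String), Dom_update_tags_config tags_config new_tags → Spec_update_tags_config tags_config new_tags (update_tags_config tags_config new_tags)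

-- ===== LEMMAS AND PROOFS =====

-- A's loop body is a single overwrite-insert: increment the existing count or start at 1.
theorem stepA_eq (d : PySem.Dict String Int) (tag : String) :
    (if d.contains tag then d.modify tag 0 (· + 1) else d.insert tag 1)
      = d.insert tag (d.getD tag 0 + 1) := by
  by_cases h : d.contains tag = true
  · simp [h, PySem.Dict.modify]
  · simp only [Bool.not_eq_true] at h
    rw [if_neg (by simp [h]), PySem.Dict.getD_of_not_contains d 0 h]
    norm_num

-- B's conditional-insert loop: keys grow exactly as a set update.
theorem keys_condfold (l : List String) (c : String → Int) (d : PySem.Dict String Int) :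
    (l.foldl (fun d tag => if d.contains tag then d else d.insert tag (c tag)) d).keys
      = PySem.Set.update d.keys l := by
  induction l generalizing d with
  | nil => rfl
  | cons t rest ih =>
    simp only [List.foldl_cons, PySem.Set.update_cons]
    by_cases h : d.contains t = true
    · rw [if_pos h, PySem.Set.add_of_mem ((PySem.Dict.contains_iff_mem_keys d t).mp h), ih]
    · simp only [Bool.not_eq_true] at h
      rw [if_neg (by simp [h]),
          PySem.Set.add_of_not_mem (fun hc => by simp [(PySem.Dict.contains_iff_mem_keys d t).mpr hc] at h),
          ih, PySem.Dict.keys_insert_of_not_contains d _ h]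

-- B's conditional-insert loop keeps keys Nodup.
theorem nodup_keys_condfold (l : List String) (c : String → Int) (d : PySem.Dict String Int)
    (h : d.keys.Nodup) :
    (l.foldl (fun d tag => if d.contains tag then d else d.insert tag (c tag)) d).keys.Nodup := by
  induction l generalizing d with
  | nil => exact h
  | cons t rest ih =>
    simp only [List.foldl_cons]
    by_cases hc : d.contains t = true
    · rw [if_pos hc]; exact ih d h
    · simp only [Bool.not_eq_true] at hc
      rw [if_neg (by simp [hc])]
      exact ih _ (PySem.Dict.nodup_keys_insert d t _ h)

-- lookups at keys already present are untouched by the conditional-insert loop.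
theorem getD_condfold_contains (l : List String) (c : String → Int) (d : PySem.Dict String Int)
    (v : String) (hv : d.contains v = true) :
    (l.foldl (fun d tag => if d.contains tag then d else d.insert tag (c tag)) d).getD v 0
      = d.getD v 0 := by
  induction l generalizing d with
  | nil => rfl
  | cons t rest ih =>
    simp only [List.foldl_cons]
    by_cases hc : d.contains t = true
    · rw [if_pos hc]; exact ih d hv
    · simp only [Bool.not_eq_true] at hc
      have hne : v ≠ t := by intro he; rw [he, hc] at hv; cases hv
      rw [if_neg (by simp [hc]),
          ih _ (by rw [PySem.Dict.contains_insert]; simp [hv]),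
          PySem.Dict.getD_insert_of_ne d _ _ hne]

-- a key absent from d but present in l ends with value c v.
theorem getD_condfold_new (l : List String) (c : String → Int) (d : PySem.Dict String Int)
    (v : String) (hv : d.contains v = false) (hm : v ∈ l) :
    (l.foldl (fun d tag => if d.contains tag then d else d.insert tag (c tag)) d).getD v 0
      = c v := by
  induction l generalizing d with
  | nil => simp at hm
  | cons t rest ih =>
    simp only [List.foldl_cons]
    by_cases he : t = v
    · subst he
      rw [if_neg (by simp [hv]),
          getD_condfold_contains _ _ _ _ (PySem.Dict.contains_insert_self d t _),
          PySem.Dict.getD_insert_self]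
    · have hm' : v ∈ rest := by rcases List.mem_cons.mp hm with h | h; exact absurd h.symm he; exact h
      by_cases hc : d.contains t = true
      · rw [if_pos hc]; exact ih d hv hm'
      · simp only [Bool.not_eq_true] at hc
        rw [if_neg (by simp [hc])]
        have hne : v ≠ t := fun h => he h.symm
        exact ih _ (by rw [PySem.Dict.contains_insert]; simp [hv, hne]) hm'

theorem getD_A (tags_config : List (String × Int)) (new_tags : List String) (v : String) :
    (new_tags.foldl (fun d x => d.insert x (d.getD x 0 + 1)) (PySem.Dict.ofList tags_config)).getD v 0
      = (PySem.Dict.ofList tags_config).getD v 0 + (new_tags.count v : Int) :=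
  PySem.Dict.getD_foldl_insert_add_one _ _ _

-- ===== VERDICT (by name: the statement is the Claim_ definition above) =====
theorem update_tags_config_spec : Claim_equal_update_tags_config := by
  intro tags_config new_tags _
  unfold Spec_update_tags_config update_tags_config update_tags_config_alt
  -- rewrite A's loop body
  have hf : (fun (updated_tags : PySem.Dict String Int) (tag : String) =>
      if updated_tags.contains tag then updated_tags.modify tag 0 (· + 1)
      else updated_tags.insert tag 1)
      = fun d x => d.insert x (d.getD x 0 + 1) := by
    funext d x; exact stepA_eq d x
  rw [hf]
  set d0 := PySem.Dict.ofList tags_config with hd0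
  have hnd0 : d0.keys.Nodup := PySem.Dict.nodup_keys_ofList _
  -- base list and B's starting dict
  set base := d0.items.map (fun p => (p.1, p.2 + (new_tags.count p.1 : Int))) with hbase
  have hitems0 : d0.items = d0.keys.map (fun k => (k, d0.getD k 0)) :=
    PySem.Dict.items_eq_map_keys d0 hnd0 0
  have hbase' : base = d0.keys.map (fun k => (k, d0.getD k 0 + (new_tags.count k : Int))) := by
    rw [hbase, hitems0, List.map_map]; rfl
  have hbkeys : base.map Prod.fst = d0.keys := by
    rw [hbase', List.map_map]
    have : (Prod.fst ∘ fun k => (k, d0.getD k 0 + (new_tags.count k : Int))) = id := rfl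
    rw [this, List.map_id]
  set d1 := PySem.Dict.ofList base with hd1
  -- d1's items are exactly base (distinct fresh keys inserted into empty)
  have hd1items : d1.items = base := by
    rw [hd1, PySem.Dict.ofList]
    have := PySem.Dict.items_foldl_insert_fresh base (fun p => p.1) (fun p => p.2)
        PySem.Dict.empty (by intro a _; rfl) (by rw [hbkeys]; exact hnd0)
    simpa using this
  have hd1keys : d1.keys = d0.keys := by
    have : d1.keys = d1.items.map Prod.fst := rfl
    rw [this, hd1items, hbkeys]
  have hnd1 : d1.keys.Nodup := by rw [hd1keys]; exact hnd0
  -- lookups in d1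
  have hgetD1 : ∀ v, v ∈ d0.keys → d1.getD v 0 = d0.getD v 0 + (new_tags.count v : Int) := by
    intro v hv
    have hmem : (v, d0.getD v 0 + (new_tags.count v : Int)) ∈ d1.items := by
      rw [hd1items, hbase']; exact List.mem_map_of_mem hv
    exact PySem.Dict.getD_of_mem_items _ hmem hnd1 0
  -- final dicts
  set dA := new_tags.foldl (fun d x => d.insert x (d.getD x 0 + 1)) d0 with hdA
  set dB := new_tags.foldl (fun d tag =>
      if d.contains tag then d else d.insert tag (new_tags.count tag : Int)) d1 with hdB
  have hkA : dA.keys = PySem.Set.update d0.keys new_tags := PySem.Dict.keys_foldl_insert _ _ _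
  have hkB : dB.keys = PySem.Set.update d0.keys new_tags := by
    rw [hdB, keys_condfold, hd1keys]
  have hnA : dA.keys.Nodup := PySem.Dict.nodup_keys_foldl_insert _ _ _ hnd0
  have hnB : dB.keys.Nodup := nodup_keys_condfold _ _ _ hnd1
  rw [PySem.Dict.items_eq_map_keys dA hnA 0, PySem.Dict.items_eq_map_keys dB hnB 0, hkA, hkB]
  apply List.map_congr_left
  intro k hk
  have hgA : dA.getD k 0 = d0.getD k 0 + (new_tags.count k : Int) := getD_A _ _ _
  by_cases hk0 : k ∈ d0.keys
  · have hc1 : d1.contains k = true := by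
      rw [PySem.Dict.contains_iff_mem_keys, hd1keys]; exact hk0
    rw [hgA, hdB, getD_condfold_contains _ _ _ _ hc1, hgetD1 k hk0]
  · have hkl : k ∈ new_tags := by
      rcases (PySem.Set.mem_update _ _ _).mp hk with h | h
      · exact absurd h hk0
      · exact h
    have hc1 : d1.contains k = false := by
      rw [Bool.eq_false_iff]
      intro hc; exact hk0 (hd1keys ▸ (PySem.Dict.contains_iff_mem_keys d1 k).mp hc)
    have hd0k : d0.contains k = false := by
      rw [Bool.eq_false_iff]
      intro hc; exact hk0 ((PySem.Dict.contains_iff_mem_keys d0 k).mp hc)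
    rw [hgA, hdB, getD_condfold_new _ _ _ _ hc1 hkl,
        PySem.Dict.getD_of_not_contains d0 0 hd0k]
    simp
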